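-- pv_equiv track=rewrite | github.com/arauzo/ppcproject | algoritmosProyectoPrueba/graph.py | reversedGraph
-- ===== SOURCE A (Python) =====
-- def reversedGraph(graph):
--     """
--     Returns a new directed graph data structure with all arcs
--     reversed. Can be used as a table of inputs to nodes instead of
--     outputs (following nodes).
--     """
--     reverted = {}
--     for node in graph:
--         inputs = []
--         for n,out in graph.items():
--             if node in out:
--                 inputs.append(n)
--         reverted[node] = inputs
--     return reverted
-- ===== SOURCE B (Python) =====
-- def reversedGraph(graph):
--     """
--     Returns a new directed graph data structure with all arcs
--     reversed. Can be used as a table of inputs to nodes instead of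
--     outputs (following nodes).
--     """
--     reverted = {node: [] for node in graph}
--     for n, out in graph.items():
--         for t in dict.fromkeys(out):
--             if t in reverted:
--                 reverted[t].append(n)
--     return reverted
-- ===== Notes on version B (the rewrite author's own statement) =====
-- stated objective: faster
-- what changed: Replaces A's per-node rescan of every out-list with a preinitialized reversed adjacency dict filled in a single pass over the edges (out-lists deduped per source node).
import Mathlib
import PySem

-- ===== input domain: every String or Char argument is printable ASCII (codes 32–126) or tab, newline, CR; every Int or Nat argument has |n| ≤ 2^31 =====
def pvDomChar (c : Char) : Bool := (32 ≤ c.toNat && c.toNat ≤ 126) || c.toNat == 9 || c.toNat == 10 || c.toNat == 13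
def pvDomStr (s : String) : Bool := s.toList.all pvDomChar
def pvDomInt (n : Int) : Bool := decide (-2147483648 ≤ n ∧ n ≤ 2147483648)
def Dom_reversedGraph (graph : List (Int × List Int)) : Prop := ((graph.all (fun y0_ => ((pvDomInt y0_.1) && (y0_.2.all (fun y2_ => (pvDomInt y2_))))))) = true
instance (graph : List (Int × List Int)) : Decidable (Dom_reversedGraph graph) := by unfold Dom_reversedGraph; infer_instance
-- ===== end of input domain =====

-- B fills a preinitialized reversed-adjacency dict in one pass over the edges (deduping each
-- out-list) instead of A's per-node rescan of every out-list; equivalence proved on assoc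
-- lists with distinct keys (the image of Python dicts).


-- ===== PORT A =====
def reversedGraph (graph : List (Int × List Int)) : List (Int × List Int) :=
  let reverted :=
    graph.foldl (fun (reverted : PySem.Dict Int (List Int)) node =>
      reverted.insert node.1
        (graph.foldl (fun inputs p => if node.1 ∈ p.2 then inputs ++ [p.1] else inputs) []))
      PySem.Dict.empty
  reverted.items

-- ===== PORT B =====
def reversedGraph_alt (graph : List (Int × List Int)) : List (Int × List Int) :=
  let init :=
    graph.foldl (fun (d : PySem.Dict Int (List Int)) node => d.insert node.1 []) PySem.Dict.empty
  let final :=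
    graph.foldl (fun reverted p =>
      (PySem.List.dedup p.2).foldl (fun rev t =>
        if rev.contains t then rev.modify t [] (fun v => v ++ [p.1]) else rev) reverted) init
  final.items

-- ===== PRECONDITION & SPEC =====
-- Pre_ requires the association list to have distinct keys: only such lists represent a Python
-- dict (the type of A's argument); it excludes no input the Python A can be called on.
def Pre_reversedGraph (graph : List (Int × List Int)) : Prop := (graph.map Prod.fst).Nodup
instance (graph : List (Int × List Int)) : Decidable (Pre_reversedGraph graph) := by unfold Pre_reversedGraph; infer_instance
def pvWitness_reversedGraph : (List (Int × List Int)) := [(1, [2, 3]), (2, [1, 2]), (3, [])]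
def Spec_reversedGraph (graph : List (Int × List Int)) (out : List (Int × List Int)) : Prop := out = reversedGraph_alt graph
instance (graph : List (Int × List Int)) (out : List (Int × List Int)) : Decidable (Spec_reversedGraph graph out) := by unfold Spec_reversedGraph; infer_instance

-- ===== CLAIM (what is proved, stated in full; the proofs are below) =====
def Claim_equal_reversedGraph : Prop := ∀ (graph : List (Int × List Int)), Dom_reversedGraph graph → Pre_reversedGraph graph → Spec_reversedGraph graph (reversedGraph graph)

-- ===== LEMMAS AND PROOFS =====

-- Folding fresh-key inserts (keys pairwise distinct, none already present) appends the entries.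
theorem pv_insertFold (g : Int → List Int) :
    ∀ (l : List (Int × List Int)) (d : PySem.Dict Int (List Int)),
      (∀ k ∈ l.map Prod.fst, d.contains k = false) → (l.map Prod.fst).Nodup →
      (l.foldl (fun d node => d.insert node.1 (g node.1)) d).items
        = d.items ++ l.map (fun node => (node.1, g node.1)) := by
  intro l
  induction l with
  | nil => intro d _ _; simp
  | cons a l ih =>
    intro d hfresh hnd
    simp only [List.foldl_cons, List.map_cons]
    have hca : d.contains a.1 = false := hfresh a.1 (by simp)
    have hins : (d.insert a.1 (g a.1)).items = d.items ++ [(a.1, g a.1)] := by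
      simp [PySem.Dict.insert, hca]
    have hfresh' : ∀ k ∈ l.map Prod.fst, (d.insert a.1 (g a.1)).contains k = false := by
      intro k hk
      have hne : a.1 ≠ k := by
        simp only [List.map_cons, List.nodup_cons] at hnd
        exact fun h => hnd.1 (h ▸ hk)
      have hk' : d.contains k = false := hfresh k (by simp [hk])
      simp [PySem.Dict.contains, hins, List.any_append] at *
      exact ⟨hk', hne⟩
    have hnd' : (l.map Prod.fst).Nodup := by
      simp only [List.map_cons, List.nodup_cons] at hnd; exact hnd.2
    rw [ih _ hfresh' hnd', hins]
    simp

-- One conditional modify step, on a dict with distinct keys, acts entrywise on the items.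
theorem pv_modStep (rev : PySem.Dict Int (List Int)) (t n : Int)
    (hnd : (rev.items.map Prod.fst).Nodup) :
    (if rev.contains t then rev.modify t [] (fun v => v ++ [n]) else rev).items
      = rev.items.map (fun e => if e.1 = t then (e.1, e.2 ++ [n]) else e) := by
  by_cases hc : rev.contains t = true
  · simp only [hc, if_true]
    have hmod : (rev.modify t [] (fun v => v ++ [n])).items
        = rev.items.map (fun p => if p.1 == t then (t, rev.getD t [] ++ [n]) else p) := by
      simp [PySem.Dict.modify, PySem.Dict.insert, hc]
    rw [hmod]
    apply List.map_congr_left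
    intro e he
    by_cases het : e.1 = t
    · have : rev.get? t = some e.2 := by
        have := PySem.Dict.get?_of_mem_items (d := rev) (k := e.1) (v := e.2) ?_ ?_
        · rwa [het] at this
        · exact he
        · exact hnd
      simp [het, PySem.Dict.getD_eq_get?_getD, this]
    · simp [het]
  · have hcf : rev.contains t = false := by simpa using hc
    have h1 : ∀ e ∈ rev.items, (if e.1 = t then (e.1, e.2 ++ [n]) else e) = e := by
      intro e he
      by_cases h : e.1 = t
      · exfalso
        apply hc
        simp only [PySem.Dict.contains, List.any_eq_true]
        exact ⟨e, he, by simp [h]⟩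
      · simp [h]
    rw [List.map_congr_left h1]
    simp [hcf]

-- Entrywise updates keep the key column unchanged.
theorem pv_keys (t n : Int) (l : List (Int × List Int)) :
    (l.map (fun e => if e.1 = t then (e.1, e.2 ++ [n]) else e)).map Prod.fst = l.map Prod.fst := by
  rw [List.map_map]
  apply List.map_congr_left
  intro e _
  by_cases h : e.1 = t <;> simp [h]

-- The inner loop over a duplicate-free target list acts entrywise on the items.
theorem pv_innerFold (n : Int) :
    ∀ (ts : List Int) (rev : PySem.Dict Int (List Int)),
      ts.Nodup → (rev.items.map Prod.fst).Nodup →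
      ((ts.foldl (fun rev t =>
          if rev.contains t then rev.modify t [] (fun v => v ++ [n]) else rev) rev).items)
        = rev.items.map (fun e => if e.1 ∈ ts then (e.1, e.2 ++ [n]) else e) := by
  intro ts
  induction ts with
  | nil => intro rev _ _; simp
  | cons t ts ih =>
    intro rev hts hnd
    simp only [List.foldl_cons]
    set rev' := if rev.contains t then rev.modify t [] (fun v => v ++ [n]) else rev with hrev'
    have hstep : rev'.items = rev.items.map (fun e => if e.1 = t then (e.1, e.2 ++ [n]) else e) :=
      pv_modStep rev t n hnd
    have hnd' : (rev'.items.map Prod.fst).Nodup := by rw [hstep, pv_keys]; exact hnd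
    rw [ih rev' (List.nodup_cons.mp hts).2 hnd', hstep, List.map_map]
    apply List.map_congr_left
    intro e _
    by_cases h : e.1 = t
    · have ht : t ∉ ts := (List.nodup_cons.mp hts).1
      simp [h, ht]
    · by_cases h2 : e.1 ∈ ts <;> simp [h, h2, Function.comp]

-- Entrywise membership-guarded updates also keep the key column unchanged.
theorem pv_keys2 (n : Int) (ts : List Int) (l : List (Int × List Int)) :
    (l.map (fun e => if e.1 ∈ ts then (e.1, e.2 ++ [n]) else e)).map Prod.fst = l.map Prod.fst := by
  rw [List.map_map]
  apply List.map_congr_left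
  intro e _
  by_cases h : e.1 ∈ ts <;> simp [h]

-- The outer loop appends, to each entry's list, the sources whose out-list contains its key.
theorem pv_outerFold :
    ∀ (l : List (Int × List Int)) (rev : PySem.Dict Int (List Int)),
      (rev.items.map Prod.fst).Nodup →
      ((l.foldl (fun reverted p =>
          (PySem.List.dedup p.2).foldl (fun rev t =>
            if rev.contains t then rev.modify t [] (fun v => v ++ [p.1]) else rev) reverted) rev).items)
        = rev.items.map (fun e => (e.1, e.2 ++ (l.filter (fun p => e.1 ∈ p.2)).map Prod.fst)) := by
  intro l
  induction l with
  | nil => intro rev _; simp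
  | cons p l ih =>
    intro rev hnd
    simp only [List.foldl_cons]
    set rev' := (PySem.List.dedup p.2).foldl (fun rev t =>
        if rev.contains t then rev.modify t [] (fun v => v ++ [p.1]) else rev) rev with hrev'
    have hstep : rev'.items
        = rev.items.map (fun e => if e.1 ∈ PySem.List.dedup p.2 then (e.1, e.2 ++ [p.1]) else e) :=
      pv_innerFold p.1 (PySem.List.dedup p.2) rev (PySem.List.nodup_dedup p.2) hnd
    have hnd' : (rev'.items.map Prod.fst).Nodup := by rw [hstep, pv_keys2]; exact hnd
    rw [ih rev' hnd', hstep, List.map_map]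
    apply List.map_congr_left
    intro e _
    by_cases h : e.1 ∈ p.2
    · simp [Function.comp, h]
    · simp [Function.comp, h]

-- A's inner accumulation loop is the filtered source column.
theorem pv_inputsA (k : Int) (graph : List (Int × List Int)) :
    graph.foldl (fun inputs p => if k ∈ p.2 then inputs ++ [p.1] else inputs) []
      = (graph.filter (fun p => k ∈ p.2)).map Prod.fst := by
  simpa using PySem.List.foldl_append_if (l := graph) (acc := [])
    (fun p => decide (k ∈ p.2)) Prod.fst

-- ===== VERDICT (by name: the statement is the Claim_ definition above) =====
theorem reversedGraph_spec : Claim_equal_reversedGraph := by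
  intro graph _ hpre
  unfold Spec_reversedGraph
  have hpre' : (graph.map Prod.fst).Nodup := hpre
  have hfresh : ∀ k ∈ graph.map Prod.fst,
      (PySem.Dict.empty : PySem.Dict Int (List Int)).contains k = false := by
    intro k _; simp [PySem.Dict.contains, PySem.Dict.empty]
  simp only [reversedGraph, reversedGraph_alt]
  rw [pv_insertFold (fun k =>
        graph.foldl (fun inputs p => if k ∈ p.2 then inputs ++ [p.1] else inputs) [])
      graph PySem.Dict.empty hfresh hpre']
  have hinit : graph.foldl (fun (d : PySem.Dict Int (List Int)) node => d.insert node.1 [])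
      PySem.Dict.empty = PySem.Dict.mk (graph.map (fun node => (node.1, ([] : List Int)))) := by
    have h : (graph.foldl (fun (d : PySem.Dict Int (List Int)) node => d.insert node.1 [])
        PySem.Dict.empty).items = graph.map (fun node => (node.1, ([] : List Int))) := by
      simpa using pv_insertFold (fun _ => []) graph PySem.Dict.empty hfresh hpre'
    calc graph.foldl (fun (d : PySem.Dict Int (List Int)) node => d.insert node.1 [])
          PySem.Dict.empty
        = ⟨(graph.foldl (fun (d : PySem.Dict Int (List Int)) node => d.insert node.1 [])
            PySem.Dict.empty).items⟩ := rfl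
      _ = _ := by rw [h]
  have hnd2 : (((graph.map (fun node => (node.1, ([] : List Int)))).map Prod.fst)).Nodup := by
    rw [List.map_map]; exact hpre'
  rw [hinit, show (PySem.Dict.empty : PySem.Dict Int (List Int)).items = [] from rfl,
      List.nil_append]
  rw [pv_outerFold graph ⟨graph.map (fun node => (node.1, ([] : List Int)))⟩ hnd2]
  rw [List.map_map]
  apply List.map_congr_left
  intro e _
  simp [pv_inputsA]
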